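-- pv_equiv track=rewrite | github.com/Carbondots/carbon_dots_mining | property_mining/11_llm_structure_and_deduplicate_properties.py | resolve_final_destinations
-- ===== SOURCE A (Python) =====
-- from typing import Any, Dict, List, Optional, Sequence, Set, Tuple
--
-- def resolve_final_destinations(entry_id: int, kept_ids: Set[int], merge_targets: Dict[int, Set[int]], seen: Optional[Set[int]] = None) -> List[int]:
--     if entry_id in kept_ids:
--         return [entry_id]
--     seen = set(seen or set())
--     if entry_id in seen:
--         return []
--     seen.add(entry_id)
--     out: Set[int] = set()
--     for target in merge_targets.get(entry_id, set()):
--         if target in kept_ids: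
--             out.add(target)
--         else:
--             out.update(resolve_final_destinations(target, kept_ids, merge_targets, seen))
--     return sorted(out)
-- ===== SOURCE B (Python) =====
-- def resolve_final_destinations(entry_id, kept_ids, merge_targets, seen=None):
--     # Iterative DFS with an explicit stack and one shared visited set (no per-path copies of seen).
--     if entry_id in kept_ids:
--         return [entry_id]
--     visited = set(seen) if seen else set()
--     if entry_id in visited:
--         return []
--     out = set()
--     stack = [entry_id]
--     while stack:
--         v = stack.pop()
--         if v in visited:
--             continue
--         visited.add(v)
--         for t in merge_targets.get(v, ()):
--             if t in kept_ids:
--                 out.add(t)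
--             elif t not in visited:
--                 stack.append(t)
--     return sorted(out)
-- ===== Notes on version B (the rewrite author's own statement) =====
-- stated objective: alternative
-- what changed: A is a recursive search that copies the 'seen' set per call, so sibling branches re-explore shared sub-graphs; B is an iterative explicit-stack DFS with one global visited set that processes each node at most once and sorts once at the end.
import Mathlib
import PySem

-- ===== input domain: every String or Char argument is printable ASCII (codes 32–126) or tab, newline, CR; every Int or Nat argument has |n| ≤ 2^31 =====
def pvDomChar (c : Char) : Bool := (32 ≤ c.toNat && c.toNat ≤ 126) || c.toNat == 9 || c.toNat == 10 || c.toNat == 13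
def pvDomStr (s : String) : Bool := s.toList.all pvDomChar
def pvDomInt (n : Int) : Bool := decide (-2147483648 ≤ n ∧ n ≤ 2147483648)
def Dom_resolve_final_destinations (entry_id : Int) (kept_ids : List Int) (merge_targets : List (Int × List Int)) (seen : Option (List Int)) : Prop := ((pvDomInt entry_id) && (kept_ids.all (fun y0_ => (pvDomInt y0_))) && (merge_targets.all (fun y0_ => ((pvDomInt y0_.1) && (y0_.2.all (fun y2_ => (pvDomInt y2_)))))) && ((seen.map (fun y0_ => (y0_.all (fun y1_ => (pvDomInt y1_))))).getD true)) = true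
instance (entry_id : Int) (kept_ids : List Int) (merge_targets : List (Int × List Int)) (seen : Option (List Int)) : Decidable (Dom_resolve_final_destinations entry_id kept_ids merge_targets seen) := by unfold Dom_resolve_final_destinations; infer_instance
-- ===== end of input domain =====

-- B replaces A's per-call-copied `seen` recursion by an iterative explicit-stack DFS with one
-- global visited set that processes each node at most once (alternative algorithm, same values).

-- ===== PORT A =====
-- A's recursion, with a fuel parameter that only makes it total: each recursive call adds a
-- fresh key of merge_targets to `seen`, so with fuel = merge_targets.length + 1 the fuel-0
-- branch is never reached (this is proved implicitly by the characterisation lemma below).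
def pvAGo (kept_ids : List Int) (merge_targets : List (Int × List Int)) :
    Nat → Int → List Int → List Int
  | 0, _, _ => []
  | fuel+1, entry_id, seen =>
    if entry_id ∈ kept_ids then [entry_id]
    else if entry_id ∈ seen then []
    else
      let seen' := PySem.Set.add seen entry_id
      let out : PySem.Set Int :=
        (PySem.Dict.getD (PySem.Dict.mk merge_targets) entry_id []).foldl
          (fun out target =>
            if target ∈ kept_ids then PySem.Set.add out target
            else PySem.Set.update out (pvAGo kept_ids merge_targets fuel target seen'))
          PySem.Set.empty
      PySem.List.sorted out (fun x => x) false

def resolve_final_destinations (entry_id : Int) (kept_ids : List Int) (merge_targets : List (Int × List Int)) (seen : Option (List Int)) : List Int :=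
  pvAGo kept_ids merge_targets (merge_targets.length + 1) entry_id
    (PySem.Set.ofList (seen.getD []))

-- ===== PORT B =====
-- B's while-loop over an explicit stack; fuel again only makes the loop total (the loop
-- terminates well before the fuel computed in resolve_final_destinations_alt runs out).
def pvBLoop (kept_ids : List Int) (merge_targets : List (Int × List Int)) :
    Nat → List Int → PySem.Set Int → PySem.Set Int → PySem.Set Int
  | 0, _, _, out => out
  | _+1, [], _, out => out
  | fuel+1, v :: stack, visited, out =>
    if v ∈ visited then pvBLoop kept_ids merge_targets fuel stack visited out
    else
      let visited' := PySem.Set.add visited v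
      let st :=
        (PySem.Dict.getD (PySem.Dict.mk merge_targets) v []).foldl
          (fun (acc : List Int × PySem.Set Int) t =>
            if t ∈ kept_ids then (acc.1, PySem.Set.add acc.2 t)
            else if t ∈ visited' then acc
            else (t :: acc.1, acc.2))
          (stack, out)
      pvBLoop kept_ids merge_targets fuel st.1 visited' st.2

def resolve_final_destinations_alt (entry_id : Int) (kept_ids : List Int) (merge_targets : List (Int × List Int)) (seen : Option (List Int)) : List Int :=
  if entry_id ∈ kept_ids then [entry_id]
  else
    let visited := PySem.Set.ofList (seen.getD [])
    if entry_id ∈ visited then []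
    else
      let w := (merge_targets.flatMap (fun p => p.1 :: p.2)).length
      PySem.List.sorted
        (pvBLoop kept_ids merge_targets (2 + w * (1 + w)) [entry_id] visited PySem.Set.empty)
        (fun x => x) false

-- ===== PRECONDITION & SPEC =====
def Spec_resolve_final_destinations (entry_id : Int) (kept_ids : List Int) (merge_targets : List (Int × List Int)) (seen : Option (List Int)) (out : List Int) : Prop := out = resolve_final_destinations_alt entry_id kept_ids merge_targets seen
instance (entry_id : Int) (kept_ids : List Int) (merge_targets : List (Int × List Int)) (seen : Option (List Int)) (out : List Int) : Decidable (Spec_resolve_final_destinations entry_id kept_ids merge_targets seen out) := by unfold Spec_resolve_final_destinations; infer_instance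

-- ===== CLAIM (what is proved, stated in full; the proofs are below) =====
def Claim_equal_resolve_final_destinations : Prop := ∀ (entry_id : Int) (kept_ids : List Int) (merge_targets : List (Int × List Int)) (seen : Option (List Int)), Dom_resolve_final_destinations entry_id kept_ids merge_targets seen → Spec_resolve_final_destinations entry_id kept_ids merge_targets seen (resolve_final_destinations entry_id kept_ids merge_targets seen)

-- ===== LEMMAS AND PROOFS =====

-- successors of v in the merge-target graph, and the finite candidate-node list
def pvSucc (d : List (Int × List Int)) (v : Int) : List Int :=
  PySem.Dict.getD (PySem.Dict.mk d) v []

def pvCands (d : List (Int × List Int)) : List Int :=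
  d.flatMap (fun p => p.1 :: p.2)

-- pvWalk kept d T e ms k: an edge path e → ms… → k whose inner nodes ms avoid kept and the
-- avoid-predicate T, ending with an edge into the kept node k.
def pvWalk (kept : List Int) (d : List (Int × List Int)) (T : Int → Prop) :
    Int → List Int → Int → Prop
  | e, [], k => k ∈ pvSucc d e ∧ k ∈ kept
  | e, m :: ms, k => m ∈ pvSucc d e ∧ m ∉ kept ∧ ¬ T m ∧ pvWalk kept d T m ms k

lemma pvSucc_cases (d : List (Int × List Int)) (v : Int) :
    pvSucc d v = [] ∨ (v ∈ d.map Prod.fst ∧ (pvSucc d v).length < (pvCands d).length) := by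
  induction d with
  | nil => left; rfl
  | cons p rest ih =>
    obtain ⟨a, bs⟩ := p
    have hc : pvCands ((a, bs) :: rest) = a :: (bs ++ pvCands rest) := by
      simp [pvCands]
    by_cases h : a = v
    · right
      subst h
      refine ⟨by simp, ?_⟩
      have hs : pvSucc ((a, bs) :: rest) a = bs := by
        simp [pvSucc, PySem.Dict.getD, PySem.Dict.get?_mk_cons]
      rw [hs, hc]
      simp only [List.length_cons, List.length_append]
      omega
    · have hs : pvSucc ((a, bs) :: rest) v = pvSucc rest v := by
        simp [pvSucc, PySem.Dict.getD, PySem.Dict.get?_mk_cons, h]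
      rw [hs]
      rcases ih with h0 | ⟨h1, h2⟩
      · left; exact h0
      · right
        refine ⟨by simp [h1], ?_⟩
        rw [hc]
        simp only [List.length_cons, List.length_append]
        omega

lemma pvMemKeys_mem_cands {d : List (Int × List Int)} {v : Int}
    (h : v ∈ d.map Prod.fst) : v ∈ pvCands d := by
  simp only [List.mem_map] at h
  obtain ⟨p, hp, rfl⟩ := h
  simp only [pvCands, List.mem_flatMap]
  exact ⟨p, hp, List.mem_cons_self⟩

lemma pvFilter_len_lt {p q : Int → Bool} (xs : List Int)
    (himp : ∀ x, q x = true → p x = true) {e : Int} (he : e ∈ xs)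
    (hpe : p e = true) (hqe : q e = false) :
    (xs.filter q).length < (xs.filter p).length := by
  induction xs with
  | nil => cases he
  | cons a l ih =>
    have hmono := (List.monotone_filter_right l (fun x hx => himp x hx)).length_le
    rcases List.mem_cons.1 he with rfl | ha
    · simp only [List.filter_cons, hpe, hqe]
      simpa using Nat.lt_succ_of_le hmono
    · by_cases hqa : q a = true
      · have hpa := himp a hqa
        simp only [List.filter_cons, hpa, hqa]
        simpa using ih ha
      · by_cases hpa : p a = true
        · simp only [List.filter_cons, hpa, hqa, Bool.false_eq_true, if_false, if_true,
            List.length_cons]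
          exact Nat.lt_succ_of_le hmono
        · simp only [List.filter_cons, hqa, hpa, Bool.false_eq_true, if_false]
          exact ih ha

lemma pvWalk_mono {kept : List Int} {d : List (Int × List Int)} {T₁ T₂ : Int → Prop}
    (himp : ∀ x, T₁ x → T₂ x) :
    ∀ ms e k, pvWalk kept d T₂ e ms k → pvWalk kept d T₁ e ms k := by
  intro ms
  induction ms with
  | nil => intro e k h; exact h
  | cons m ms ih =>
    intro e k h
    obtain ⟨h1, h2, h3, h4⟩ := h
    exact ⟨h1, h2, fun hx => h3 (himp m hx), ih m k h4⟩

lemma pvWalk_congr {kept : List Int} {d : List (Int × List Int)} {T₁ T₂ : Int → Prop}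
    (h : ∀ x, T₁ x ↔ T₂ x) (ms : List Int) (e k : Int) :
    pvWalk kept d T₁ e ms k ↔ pvWalk kept d T₂ e ms k := by
  exact ⟨pvWalk_mono (T₁ := T₂) (T₂ := T₁) (fun x hx => (h x).2 hx) ms e k,
    pvWalk_mono (fun x hx => (h x).1 hx) ms e k⟩

lemma pvWalk_suffix {kept : List Int} {d : List (Int × List Int)} {T : Int → Prop} :
    ∀ (pre : List Int) (e m : Int) (suf : List Int) (k : Int),
      pvWalk kept d T e (pre ++ m :: suf) k → pvWalk kept d T m suf k := by
  intro pre
  induction pre with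
  | nil => intro e m suf k h; exact h.2.2.2
  | cons a pre ih =>
    intro e m suf k h
    exact ih a m suf k h.2.2.2

lemma pvWalk_avoid {kept : List Int} {d : List (Int × List Int)} {T : Int → Prop} {e : Int} :
    ∀ ms v k, pvWalk kept d T v ms k → (∀ x ∈ ms, x ≠ e) →
      pvWalk kept d (fun x => x = e ∨ T x) v ms k := by
  intro ms
  induction ms with
  | nil => intro v k h _; exact h
  | cons m ms ih =>
    intro v k h hmem
    obtain ⟨h1, h2, h3, h4⟩ := h
    refine ⟨h1, h2, ?_, ih m k h4 (fun x hx => hmem x (List.mem_cons_of_mem _ hx))⟩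
    rintro (rfl | hT)
    · exact hmem m List.mem_cons_self rfl
    · exact h3 hT

lemma pvWalk_shorten {kept : List Int} {d : List (Int × List Int)} {T : Int → Prop} {e k : Int} :
    ∀ (n : Nat) (ms : List Int), ms.length ≤ n → pvWalk kept d T e ms k →
      ∃ ms', pvWalk kept d (fun x => x = e ∨ T x) e ms' k := by
  intro n
  induction n with
  | zero =>
    intro ms hlen hw
    have : ms = [] := List.eq_nil_of_length_eq_zero (Nat.le_zero.1 hlen)
    subst this
    exact ⟨[], hw⟩
  | succ n ih =>
    intro ms hlen hw
    by_cases he : e ∈ ms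
    · obtain ⟨pre, suf, rfl⟩ := List.append_of_mem he
      have hw' := pvWalk_suffix pre e e suf k hw
      refine ih suf ?_ hw'
      simp only [List.length_append, List.length_cons] at hlen
      omega
    · exact ⟨ms, pvWalk_avoid ms e k hw (fun x hx hxe => he (hxe ▸ hx))⟩

lemma pvWalk_step_iff (kept : List Int) (d : List (Int × List Int)) (T : Int → Prop)
    (e k : Int) :
    (∃ ms, pvWalk kept d T e ms k) ↔
      ∃ t ∈ pvSucc d e, (t ∈ kept ∧ k = t) ∨
        (t ∉ kept ∧ ¬ T t ∧ ∃ ms, pvWalk kept d (fun x => x = t ∨ T x) t ms k) := by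
  constructor
  · rintro ⟨ms, hw⟩
    cases ms with
    | nil => exact ⟨k, hw.1, Or.inl ⟨hw.2, rfl⟩⟩
    | cons m ms =>
      obtain ⟨h1, h2, h3, h4⟩ := hw
      exact ⟨m, h1, Or.inr ⟨h2, h3, pvWalk_shorten ms.length ms le_rfl h4⟩⟩
  · rintro ⟨t, ht, ⟨hk, rfl⟩ | ⟨h2, h3, ms, hw⟩⟩
    · exact ⟨[], ht, hk⟩
    · exact ⟨t :: ms, ht, h2, h3, pvWalk_mono (fun x hx => Or.inr hx) ms t k hw⟩

-- ---- A-side characterisation ----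

lemma pvAFold_mem (kept : List Int) (rec : Int → List Int) (ts : List Int) :
    ∀ (init : PySem.Set Int) (k : Int),
      k ∈ ts.foldl
        (fun out t => if t ∈ kept then PySem.Set.add out t else PySem.Set.update out (rec t))
        init ↔
      k ∈ init ∨ ∃ t ∈ ts, (t ∈ kept ∧ k = t) ∨ (t ∉ kept ∧ k ∈ rec t) := by
  induction ts with
  | nil => intro init k; simp
  | cons t ts ih =>
    intro init k
    simp only [List.foldl_cons]
    by_cases ht : t ∈ kept
    · rw [if_pos ht, ih]
      simp only [PySem.Set.mem_add, List.mem_cons]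
      constructor
      · rintro ((hk | heq) | ⟨u, hu, hc⟩)
        · exact Or.inl hk
        · exact Or.inr ⟨t, Or.inl rfl, Or.inl ⟨ht, heq⟩⟩
        · exact Or.inr ⟨u, Or.inr hu, hc⟩
      · rintro (hk | ⟨u, rfl | hu, hc⟩)
        · exact Or.inl (Or.inl hk)
        · rcases hc with ⟨_, rfl⟩ | ⟨hnk, _⟩
          · exact Or.inl (Or.inr rfl)
          · exact absurd ht hnk
        · exact Or.inr ⟨u, hu, hc⟩
    · rw [if_neg ht, ih]
      simp only [PySem.Set.mem_update, List.mem_cons]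
      constructor
      · rintro ((hk | hr) | ⟨u, hu, hc⟩)
        · exact Or.inl hk
        · exact Or.inr ⟨t, Or.inl rfl, Or.inr ⟨ht, hr⟩⟩
        · exact Or.inr ⟨u, Or.inr hu, hc⟩
      · rintro (hk | ⟨u, rfl | hu, hc⟩)
        · exact Or.inl (Or.inl hk)
        · rcases hc with ⟨hkk, rfl⟩ | ⟨_, hr⟩
          · exact absurd hkk ht
          · exact Or.inl (Or.inr hr)
        · exact Or.inr ⟨u, hu, hc⟩

lemma pvAFold_nodup (kept : List Int) (rec : Int → List Int) (ts : List Int) :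
    ∀ (init : PySem.Set Int), init.Nodup →
      (ts.foldl
        (fun out t => if t ∈ kept then PySem.Set.add out t else PySem.Set.update out (rec t))
        init).Nodup := by
  induction ts with
  | nil => intro init h; exact h
  | cons t ts ih =>
    intro init h
    simp only [List.foldl_cons]
    by_cases ht : t ∈ kept
    · rw [if_pos ht]; exact ih _ (PySem.Set.nodup_add _ _ h)
    · rw [if_neg ht]; exact ih _ (PySem.Set.nodup_update _ _ h)

lemma pvAGo_kept {kept d} {e : Int} (s : List Int) (n : Nat) (h : e ∈ kept) :
    pvAGo kept d (n+1) e s = [e] := by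
  simp [pvAGo, h]

lemma pvAGo_in_seen {kept d} {e : Int} {s : List Int} (n : Nat)
    (h1 : e ∉ kept) (h2 : e ∈ s) : pvAGo kept d n e s = [] := by
  cases n with
  | zero => rfl
  | succ n => simp [pvAGo, h1, h2]

lemma pvAGo_succ_eq {kept d} {e : Int} {s : List Int} (n : Nat)
    (h1 : e ∉ kept) (h2 : e ∉ s) :
    pvAGo kept d (n+1) e s =
      PySem.List.sorted
        ((pvSucc d e).foldl
          (fun out t => if t ∈ kept then PySem.Set.add out t
            else PySem.Set.update out (pvAGo kept d n t (PySem.Set.add s e)))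
          PySem.Set.empty)
        (fun x => x) false := by
  simp [pvAGo, h1, h2, pvSucc]

lemma pvAGo_mem (kept : List Int) (d : List (Int × List Int)) :
    ∀ (n : Nat) (s : List Int) (e : Int),
      ((d.map Prod.fst).filter (fun x => decide (x ∉ s))).length < n →
      e ∉ kept → e ∉ s →
      ∀ k, k ∈ pvAGo kept d n e s ↔
        ∃ ms, pvWalk kept d (fun x => x ∈ s ∨ x = e) e ms k := by
  intro n
  induction n with
  | zero => intro s e hlen; exact absurd hlen (Nat.not_lt_zero _)
  | succ n ih =>
    intro s e hlen he hs k
    rw [pvAGo_succ_eq n he hs, PySem.List.mem_sorted,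
        pvAFold_mem kept (fun t => pvAGo kept d n t (PySem.Set.add s e)),
        pvWalk_step_iff kept d (fun x => x ∈ s ∨ x = e) e k]
    have hempty : ¬ k ∈ (PySem.Set.empty : PySem.Set Int) := List.not_mem_nil
    simp only [hempty, false_or]
    apply exists_congr
    intro t
    apply and_congr_right
    intro htmem
    apply or_congr_right
    apply and_congr_right
    intro htk
    by_cases hts : t ∈ PySem.Set.add s e
    · rw [pvAGo_in_seen n htk hts]
      have h1 : ¬ ¬ (t ∈ s ∨ t = e) := by
        rw [PySem.Set.mem_add] at hts; exact fun hc => hc hts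
      simp [h1]
    · have hts' : ¬ (t ∈ s ∨ t = e) := fun hc => hts ((PySem.Set.mem_add s e t).2 hc)
      have hek : e ∈ d.map Prod.fst := by
        rcases pvSucc_cases d e with h0 | ⟨h1, _⟩
        · rw [h0] at htmem; cases htmem
        · exact h1
      have hlen' :
          ((d.map Prod.fst).filter (fun x => decide (x ∉ PySem.Set.add s e))).length < n := by
        have hdec : ((d.map Prod.fst).filter (fun x => decide (x ∉ PySem.Set.add s e))).length <
            ((d.map Prod.fst).filter (fun x => decide (x ∉ s))).length := by
          apply pvFilter_len_lt (d.map Prod.fst)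
            (fun x hx => by
              simp only [decide_eq_true_eq, PySem.Set.mem_add] at hx ⊢
              exact fun hxs => hx (Or.inl hxs))
            hek
          · simpa using hs
          · simp [PySem.Set.mem_add]
        omega
      rw [ih (PySem.Set.add s e) t hlen' htk hts]
      simp only [hts', not_false_iff, true_and]
      apply exists_congr
      intro ms
      apply pvWalk_congr
      intro x
      rw [PySem.Set.mem_add]
      tauto

-- ---- B-side characterisation ----

lemma pvBFold_stack_mem (kept : List Int) (vis' : PySem.Set Int) (ts : List Int) :
    ∀ (acc : List Int × PySem.Set Int) (x : Int),
      x ∈ (ts.foldl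
        (fun (acc : List Int × PySem.Set Int) t =>
          if t ∈ kept then (acc.1, PySem.Set.add acc.2 t)
          else if t ∈ vis' then acc
          else (t :: acc.1, acc.2)) acc).1 ↔
      x ∈ acc.1 ∨ (x ∈ ts ∧ x ∉ kept ∧ x ∉ vis') := by
  induction ts with
  | nil => intro acc x; simp
  | cons t ts ih =>
    intro acc x
    simp only [List.foldl_cons]
    by_cases ht : t ∈ kept
    · rw [if_pos ht, ih]
      simp only [List.mem_cons]
      constructor
      · rintro (h1 | ⟨h2, h3, h4⟩)
        · exact Or.inl h1
        · exact Or.inr ⟨Or.inr h2, h3, h4⟩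
      · rintro (h1 | ⟨rfl | h2, h3, h4⟩)
        · exact Or.inl h1
        · exact absurd ht h3
        · exact Or.inr ⟨h2, h3, h4⟩
    · rw [if_neg ht]
      by_cases hv : t ∈ vis'
      · rw [if_pos hv, ih]
        simp only [List.mem_cons]
        constructor
        · rintro (h1 | ⟨h2, h3, h4⟩)
          · exact Or.inl h1
          · exact Or.inr ⟨Or.inr h2, h3, h4⟩
        · rintro (h1 | ⟨rfl | h2, h3, h4⟩)
          · exact Or.inl h1
          · exact absurd hv h4
          · exact Or.inr ⟨h2, h3, h4⟩
      · rw [if_neg hv, ih]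
        simp only [List.mem_cons]
        constructor
        · rintro ((rfl | h1) | ⟨h2, h3, h4⟩)
          · exact Or.inr ⟨Or.inl rfl, ht, hv⟩
          · exact Or.inl h1
          · exact Or.inr ⟨Or.inr h2, h3, h4⟩
        · rintro (h1 | ⟨rfl | h2, h3, h4⟩)
          · exact Or.inl (Or.inr h1)
          · exact Or.inl (Or.inl rfl)
          · exact Or.inr ⟨h2, h3, h4⟩

lemma pvBFold_out_mem (kept : List Int) (vis' : PySem.Set Int) (ts : List Int) :
    ∀ (acc : List Int × PySem.Set Int) (k : Int),
      k ∈ (ts.foldl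
        (fun (acc : List Int × PySem.Set Int) t =>
          if t ∈ kept then (acc.1, PySem.Set.add acc.2 t)
          else if t ∈ vis' then acc
          else (t :: acc.1, acc.2)) acc).2 ↔
      k ∈ acc.2 ∨ (k ∈ ts ∧ k ∈ kept) := by
  induction ts with
  | nil => intro acc k; simp
  | cons t ts ih =>
    intro acc k
    simp only [List.foldl_cons]
    by_cases ht : t ∈ kept
    · rw [if_pos ht, ih]
      simp only [PySem.Set.mem_add, List.mem_cons]
      constructor
      · rintro ((h1 | heq) | ⟨h2, h3⟩)
        · exact Or.inl h1
        · exact Or.inr ⟨Or.inl heq, heq ▸ ht⟩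
        · exact Or.inr ⟨Or.inr h2, h3⟩
      · rintro (h1 | ⟨rfl | h2, h3⟩)
        · exact Or.inl (Or.inl h1)
        · exact Or.inl (Or.inr rfl)
        · exact Or.inr ⟨h2, h3⟩
    · rw [if_neg ht]
      by_cases hv : t ∈ vis'
      · rw [if_pos hv, ih]
        simp only [List.mem_cons]
        constructor
        · rintro (h1 | ⟨h2, h3⟩)
          · exact Or.inl h1
          · exact Or.inr ⟨Or.inr h2, h3⟩
        · rintro (h1 | ⟨rfl | h2, h3⟩)
          · exact Or.inl h1
          · exact absurd h3 ht
          · exact Or.inr ⟨h2, h3⟩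
      · rw [if_neg hv, ih]
        simp only [List.mem_cons]
        constructor
        · rintro (h1 | ⟨h2, h3⟩)
          · exact Or.inl h1
          · exact Or.inr ⟨Or.inr h2, h3⟩
        · rintro (h1 | ⟨rfl | h2, h3⟩)
          · exact Or.inl h1
          · exact absurd h3 ht
          · exact Or.inr ⟨h2, h3⟩

lemma pvBFold_stack_len (kept : List Int) (vis' : PySem.Set Int) (ts : List Int) :
    ∀ (acc : List Int × PySem.Set Int),
      (ts.foldl
        (fun (acc : List Int × PySem.Set Int) t =>
          if t ∈ kept then (acc.1, PySem.Set.add acc.2 t)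
          else if t ∈ vis' then acc
          else (t :: acc.1, acc.2)) acc).1.length ≤ acc.1.length + ts.length := by
  induction ts with
  | nil => intro acc; simp
  | cons t ts ih =>
    intro acc
    simp only [List.foldl_cons, List.length_cons]
    by_cases ht : t ∈ kept
    · rw [if_pos ht]
      have := ih (acc.1, PySem.Set.add acc.2 t)
      simp only at this
      omega
    · rw [if_neg ht]
      by_cases hv : t ∈ vis'
      · rw [if_pos hv]
        have := ih acc
        omega
      · rw [if_neg hv]
        have := ih (t :: acc.1, acc.2)
        simp only [List.length_cons] at this
        omega

lemma pvBFold_out_nodup (kept : List Int) (vis' : PySem.Set Int) (ts : List Int) :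
    ∀ (acc : List Int × PySem.Set Int), acc.2.Nodup →
      (ts.foldl
        (fun (acc : List Int × PySem.Set Int) t =>
          if t ∈ kept then (acc.1, PySem.Set.add acc.2 t)
          else if t ∈ vis' then acc
          else (t :: acc.1, acc.2)) acc).2.Nodup := by
  induction ts with
  | nil => intro acc h; exact h
  | cons t ts ih =>
    intro acc h
    simp only [List.foldl_cons]
    by_cases ht : t ∈ kept
    · rw [if_pos ht]
      exact ih (acc.1, PySem.Set.add acc.2 t) (PySem.Set.nodup_add _ _ h)
    · rw [if_neg ht]
      by_cases hv : t ∈ vis'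
      · rw [if_pos hv]; exact ih acc h
      · rw [if_neg hv]; exact ih (t :: acc.1, acc.2) h

lemma pvClosure (kept : List Int) (d : List (Int × List Int)) (S : List Int)
    (stack : List Int) (visited : PySem.Set Int) (out : PySem.Set Int)
    (Hvis : ∀ u ∈ visited, u ∉ S → ∀ t ∈ pvSucc d u,
      (t ∈ kept → t ∈ out) ∧ (t ∉ kept → t ∉ S → t ∈ visited ∨ t ∈ stack)) (k : Int) :
    ∀ (ms : List Int) (v : Int), v ∈ visited → v ∉ S →
      pvWalk kept d (fun x => x ∈ S) v ms k →
      k ∈ out ∨ ∃ w ∈ stack, ∃ ms', pvWalk kept d (fun x => x ∈ S) w ms' k := by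
  intro ms
  induction ms with
  | nil =>
    intro v hv hvs hw
    exact Or.inl ((Hvis v hv hvs k hw.1).1 hw.2)
  | cons m ms ih =>
    intro v hv hvs hw
    obtain ⟨h1, h2, h3, h4⟩ := hw
    rcases (Hvis v hv hvs m h1).2 h2 h3 with hmv | hms
    · exact ih m hmv h3 h4
    · exact Or.inr ⟨m, hms, ms, h4⟩

lemma pvBLoop_mem (kept : List Int) (d : List (Int × List Int)) (S : List Int) :
    ∀ (fuel : Nat) (stack : List Int) (visited : PySem.Set Int) (out : PySem.Set Int),
      stack.length + ((pvCands d).filter (fun x => decide (x ∉ visited))).length *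
        (1 + (pvCands d).length) < fuel →
      (∀ u ∈ visited, u ∉ S → ∀ t ∈ pvSucc d u,
        (t ∈ kept → t ∈ out) ∧ (t ∉ kept → t ∉ S → t ∈ visited ∨ t ∈ stack)) →
      (∀ v ∈ stack, v ∉ kept ∧ v ∉ S) →
      (∀ x ∈ S, x ∈ visited) →
      ∀ k, k ∈ pvBLoop kept d fuel stack visited out ↔
        k ∈ out ∨ ∃ v ∈ stack, ∃ ms, pvWalk kept d (fun x => x ∈ S) v ms k := by
  intro fuel
  induction fuel with
  | zero => intro stack visited out hlen; exact absurd hlen (Nat.not_lt_zero _)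
  | succ n ih =>
    intro stack visited out hlen Hvis Hstk HS k
    cases stack with
    | nil => simp [pvBLoop]
    | cons v stack =>
      simp only [pvBLoop]
      by_cases hv : v ∈ visited
      · rw [if_pos hv]
        have hlen' : stack.length +
            ((pvCands d).filter (fun x => decide (x ∉ visited))).length *
              (1 + (pvCands d).length) < n := by
          simp only [List.length_cons] at hlen; omega
        have Hvis' : ∀ u ∈ visited, u ∉ S → ∀ t ∈ pvSucc d u,
            (t ∈ kept → t ∈ out) ∧ (t ∉ kept → t ∉ S → t ∈ visited ∨ t ∈ stack) := by
          intro u hu hus t ht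
          refine ⟨(Hvis u hu hus t ht).1, fun h1 h2 => ?_⟩
          rcases (Hvis u hu hus t ht).2 h1 h2 with h | h
          · exact Or.inl h
          · rcases List.mem_cons.1 h with rfl | h'
            · exact Or.inl hv
            · exact Or.inr h'
        rw [ih stack visited out hlen' Hvis'
          (fun w hw => Hstk w (List.mem_cons_of_mem _ hw)) HS k]
        constructor
        · rintro (h | ⟨w, hw, hms⟩)
          · exact Or.inl h
          · exact Or.inr ⟨w, List.mem_cons_of_mem _ hw, hms⟩
        · rintro (h | ⟨w, hw, ms, hms⟩)
          · exact Or.inl h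
          · rcases List.mem_cons.1 hw with rfl | hw'
            · exact pvClosure kept d S stack visited out Hvis' k ms w hv
                (Hstk w List.mem_cons_self).2 hms
            · exact Or.inr ⟨w, hw', ms, hms⟩
      · rw [if_neg hv]
        set vis' := PySem.Set.add visited v with hvis'
        rw [show PySem.Dict.getD (PySem.Dict.mk d) v [] = pvSucc d v from rfl]
        set st := ((pvSucc d v).foldl
          (fun (acc : List Int × PySem.Set Int) t =>
            if t ∈ kept then (acc.1, PySem.Set.add acc.2 t)
            else if t ∈ vis' then acc
            else (t :: acc.1, acc.2)) (stack, out)) with hst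
        have hsm := pvBFold_stack_mem kept vis' (pvSucc d v) (stack, out)
        have hom := pvBFold_out_mem kept vis' (pvSucc d v) (stack, out)
        have hsl := pvBFold_stack_len kept vis' (pvSucc d v) (stack, out)
        rw [← hst] at hsm hom hsl
        simp only at hsl
        have hmono : ((pvCands d).filter (fun x => decide (x ∉ vis'))).length ≤
            ((pvCands d).filter (fun x => decide (x ∉ visited))).length :=
          (List.monotone_filter_right _ (fun x hx => by
            simp only [decide_eq_true_eq, hvis', PySem.Set.mem_add] at hx ⊢
            exact fun h => hx (Or.inl h))).length_le
        have hlen2 : st.1.length +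
            ((pvCands d).filter (fun x => decide (x ∉ vis'))).length *
              (1 + (pvCands d).length) < n := by
          rcases pvSucc_cases d v with h0 | ⟨hk1, hk2⟩
          · have h1 : st.1 = stack := by
              rw [hst, h0, List.foldl_nil]
            rw [h1]
            have hq := Nat.mul_le_mul_right (1 + (pvCands d).length) hmono
            simp only [List.length_cons] at hlen
            omega
          · have hflt : ((pvCands d).filter (fun x => decide (x ∉ vis'))).length <
                ((pvCands d).filter (fun x => decide (x ∉ visited))).length := by
              apply pvFilter_len_lt (pvCands d)
                (fun x hx => by
                  simp only [decide_eq_true_eq, hvis', PySem.Set.mem_add] at hx ⊢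
                  exact fun h => hx (Or.inl h))
                (pvMemKeys_mem_cands hk1)
              · simpa using hv
              · simp [hvis', PySem.Set.mem_add]
            have hQP : ((pvCands d).filter (fun x => decide (x ∉ vis'))).length *
                  (1 + (pvCands d).length) + (1 + (pvCands d).length) ≤
                ((pvCands d).filter (fun x => decide (x ∉ visited))).length *
                  (1 + (pvCands d).length) := by
              have := Nat.mul_le_mul_right (1 + (pvCands d).length) hflt
              rw [Nat.succ_mul] at this
              exact this
            simp only [List.length_cons] at hlen
            omega
        have Hvis2 : ∀ u ∈ vis', u ∉ S → ∀ t ∈ pvSucc d u,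
            (t ∈ kept → t ∈ st.2) ∧ (t ∉ kept → t ∉ S → t ∈ vis' ∨ t ∈ st.1) := by
          intro u hu hus t ht
          rcases (PySem.Set.mem_add visited v u).1 hu with hu' | rfl
          · refine ⟨fun h1 => (hom t).2 (Or.inl ((Hvis u hu' hus t ht).1 h1)),
              fun h1 h2 => ?_⟩
            rcases (Hvis u hu' hus t ht).2 h1 h2 with h | h
            · exact Or.inl ((PySem.Set.mem_add visited v t).2 (Or.inl h))
            · rcases List.mem_cons.1 h with heq | h'
              · exact Or.inl ((PySem.Set.mem_add visited v t).2 (Or.inr heq))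
              · exact Or.inr ((hsm t).2 (Or.inl h'))
          · refine ⟨fun h1 => (hom t).2 (Or.inr ⟨ht, h1⟩), fun h1 h2 => ?_⟩
            by_cases htv : t ∈ vis'
            · exact Or.inl htv
            · exact Or.inr ((hsm t).2 (Or.inr ⟨ht, h1, htv⟩))
        have Hstk2 : ∀ w ∈ st.1, w ∉ kept ∧ w ∉ S := by
          intro w hw
          rcases (hsm w).1 hw with h | ⟨_, h2, h3⟩
          · exact Hstk w (List.mem_cons_of_mem _ h)
          · exact ⟨h2, fun hS' => h3 ((PySem.Set.mem_add visited v w).2 (Or.inl (HS w hS')))⟩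
        have HS2 : ∀ x ∈ S, x ∈ vis' :=
          fun x hx => (PySem.Set.mem_add visited v x).2 (Or.inl (HS x hx))
        rw [ih st.1 vis' st.2 hlen2 Hvis2 Hstk2 HS2 k]
        have hvS : v ∉ S := (Hstk v List.mem_cons_self).2
        constructor
        · rintro (h | ⟨w, hw, ms, hms⟩)
          · rcases (hom k).1 h with h1 | ⟨h2, h3⟩
            · exact Or.inl h1
            · exact Or.inr ⟨v, List.mem_cons_self, [], h2, h3⟩
          · rcases (hsm w).1 hw with h1 | ⟨h1, h2, h3⟩
            · exact Or.inr ⟨w, List.mem_cons_of_mem _ h1, ms, hms⟩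
            · have hwS : w ∉ S :=
                fun hS' => h3 ((PySem.Set.mem_add visited v w).2 (Or.inl (HS w hS')))
              exact Or.inr ⟨v, List.mem_cons_self, w :: ms, h1, h2, hwS, hms⟩
        · rintro (h | ⟨w, hw, ms, hms⟩)
          · exact Or.inl ((hom k).2 (Or.inl h))
          · rcases List.mem_cons.1 hw with rfl | hw'
            · exact pvClosure kept d S st.1 vis' st.2 Hvis2 k ms w
                ((PySem.Set.mem_add visited w w).2 (Or.inr rfl)) hvS hms
            · exact Or.inr ⟨w, (hsm w).2 (Or.inl hw'), ms, hms⟩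

lemma pvBLoop_nodup (kept : List Int) (d : List (Int × List Int)) :
    ∀ (fuel : Nat) (stack : List Int) (visited : PySem.Set Int) (out : PySem.Set Int),
      out.Nodup → (pvBLoop kept d fuel stack visited out).Nodup := by
  intro fuel
  induction fuel with
  | zero => intro stack visited out h; exact h
  | succ n ih =>
    intro stack visited out h
    cases stack with
    | nil => exact h
    | cons v stack =>
      simp only [pvBLoop]
      by_cases hv : v ∈ visited
      · rw [if_pos hv]; exact ih _ _ _ h
      · rw [if_neg hv]
        exact ih _ _ _ (pvBFold_out_nodup kept (PySem.Set.add visited v) _ (stack, out) h)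

-- ===== VERDICT (by name: the statement is the Claim_ definition above) =====
theorem resolve_final_destinations_spec : Claim_equal_resolve_final_destinations := by
  intro e kept d seen _
  unfold Spec_resolve_final_destinations resolve_final_destinations resolve_final_destinations_alt
  by_cases hk : e ∈ kept
  · rw [if_pos hk, pvAGo_kept _ _ hk]
  · rw [if_neg hk]
    set S := PySem.Set.ofList (seen.getD []) with hSdef
    by_cases hs : e ∈ S
    · rw [if_pos hs, pvAGo_in_seen _ hk hs]
    · rw [if_neg hs, pvAGo_succ_eq d.length hk hs]
      apply PySem.List.sorted_eq_sorted_of_perm _ _ _ (fun a b h => h)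
      have hnA := pvAFold_nodup kept
        (fun t => pvAGo kept d d.length t (PySem.Set.add S e)) (pvSucc d e)
        PySem.Set.empty (show (PySem.Set.empty : PySem.Set Int).Nodup from List.nodup_nil)
      have hnB := pvBLoop_nodup kept d
        (2 + (d.flatMap (fun p => p.1 :: p.2)).length *
          (1 + (d.flatMap (fun p => p.1 :: p.2)).length)) [e] S
        PySem.Set.empty (show (PySem.Set.empty : PySem.Set Int).Nodup from List.nodup_nil)
      refine (List.perm_ext_iff_of_nodup hnA hnB).2 ?_
      intro k
      have hlenA : ((d.map Prod.fst).filter (fun x => decide (x ∉ S))).length < d.length + 1 := by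
        have h1 := List.length_filter_le (fun x => decide (x ∉ S)) (d.map Prod.fst)
        have h2 : (d.map Prod.fst).length = d.length := by simp
        omega
      have hA : k ∈ (pvSucc d e).foldl
          (fun out t => if t ∈ kept then PySem.Set.add out t
            else PySem.Set.update out (pvAGo kept d d.length t (PySem.Set.add S e)))
          PySem.Set.empty ↔ ∃ ms, pvWalk kept d (fun x => x ∈ S ∨ x = e) e ms k := by
        rw [← PySem.List.mem_sorted _ (fun x => x) false]
        rw [← pvAGo_succ_eq d.length hk hs]
        exact pvAGo_mem kept d (d.length + 1) S e hlenA hk hs k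
      rw [hA]
      have hfuel : [e].length +
          ((pvCands d).filter (fun x => decide (x ∉ S))).length * (1 + (pvCands d).length) <
          2 + (d.flatMap (fun p => p.1 :: p.2)).length *
            (1 + (d.flatMap (fun p => p.1 :: p.2)).length) := by
        have h1 : ((pvCands d).filter (fun x => decide (x ∉ S))).length ≤ (pvCands d).length :=
          List.length_filter_le _ _
        have h2 : (pvCands d) = d.flatMap (fun p => p.1 :: p.2) := rfl
        rw [← h2]
        have h3 := Nat.mul_le_mul_right (1 + (pvCands d).length) h1
        simp only [List.length_cons, List.length_nil]
        omega
      rw [pvBLoop_mem kept d S _ [e] S PySem.Set.empty hfuel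
        (fun u hu hus => absurd hu hus)
        (fun v hv => by rcases List.mem_cons.1 hv with rfl | h; exact ⟨hk, hs⟩; cases h)
        (fun x hx => hx) k]
      have hne : ¬ k ∈ (PySem.Set.empty : PySem.Set Int) := List.not_mem_nil
      simp only [hne, List.mem_singleton, false_or, exists_eq_left]
      constructor
      · rintro ⟨ms, hw⟩
        exact ⟨ms, pvWalk_mono (fun x hx => Or.inl hx) ms e k hw⟩
      · rintro ⟨ms, hw⟩
        obtain ⟨ms', hw'⟩ := pvWalk_shorten (e := e) ms.length ms le_rfl hw
        exact ⟨ms', (pvWalk_congr (fun x => or_comm) ms' e k).1 hw'⟩
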